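-- pv_equiv track=rewrite | github.com/shan2312/DSA-Python-Solutions | Binary_Search/count_a_and_b.py | SearchPartitionStart
-- ===== SOURCE A (Python) =====
-- def SearchPartitionStart(s):
--     left, right = 0, len(s) - 1
--     leftLetter = s[left]
--
--     while left <= right:
--         mid = (left + right)//2
--
--         if s[mid] == leftLetter:
--             left = mid + 1
--             partitionIdx = mid
--
--         else:
--             right = mid - 1
--
--     return partitionIdx + 1 , leftLetter
-- ===== SOURCE B (Python) =====
-- def SearchPartitionStart(s):
--     leftLetter = s[0]
--
--     def go(lo, hi):
--         # half-open interval [lo, hi); returns the final lower bound of the search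
--         if lo >= hi:
--             return lo
--         mid = (lo + hi - 1) // 2
--         if s[mid] == leftLetter:
--             return go(mid + 1, hi)
--         return go(lo, mid)
--
--     return go(0, len(s)), leftLetter
-- ===== Notes on version B (the rewrite author's own statement) =====
-- stated objective: simpler
-- what changed: The iterative while-loop carrying an extra partitionIdx accumulator is replaced by a recursive helper over a half-open interval [lo, hi) that needs no accumulator: the answer is the final lower bound itself.
import Mathlib
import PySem

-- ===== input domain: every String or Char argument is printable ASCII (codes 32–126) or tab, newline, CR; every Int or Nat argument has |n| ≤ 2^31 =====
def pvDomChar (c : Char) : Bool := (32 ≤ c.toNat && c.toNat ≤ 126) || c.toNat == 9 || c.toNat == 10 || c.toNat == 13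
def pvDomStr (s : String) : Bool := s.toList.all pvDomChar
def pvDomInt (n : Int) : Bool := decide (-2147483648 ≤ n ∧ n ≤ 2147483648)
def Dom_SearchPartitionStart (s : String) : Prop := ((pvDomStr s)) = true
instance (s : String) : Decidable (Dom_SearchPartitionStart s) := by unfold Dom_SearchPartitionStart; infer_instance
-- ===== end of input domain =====

-- B replaces A's while-loop (inclusive bounds + a partitionIdx accumulator) by an accumulator-free
-- recursive search over a half-open interval; same binary-search decision path, objective: simpler.

-- ===== PORT A =====
-- A's while-loop. `pidx` is Python's partitionIdx; in Python it starts UNBOUND, so the Lean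
-- initial value (-1, at the call site) is never observed on Pre_ (nonempty s forces ≥ 1 match).
-- s[mid] is always in range when left ≤ right within the loop's reachable states, so the
-- `.getD ' '` default of the exact PySem.List.pyGet? is never taken there.
def pvLoopA (cs : List Char) (c : Char) (left right pidx : Int) : Int :=
  if _h : left ≤ right then
    let mid := PySem.Int.floordiv (left + right) 2
    if (PySem.List.pyGet? cs mid).getD ' ' == c then
      pvLoopA cs c (mid + 1) right mid
    else
      pvLoopA cs c left (mid - 1) pidx
  else
    pidx + 1
termination_by (right + 1 - left).toNat
decreasing_by
  · have := PySem.Int.floordiv_two_mid_bounds _h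
    omega
  · have := PySem.Int.floordiv_two_mid_bounds _h
    omega

def SearchPartitionStart (s : String) : Int × String :=
  match PySem.List.pyGet? s.toList 0 with
  | none => (0, "")   -- unreachable under Pre_: Python raises IndexError at s[left] on empty s
  | some c => (pvLoopA s.toList c 0 ((s.toList.length : Int) - 1) (-1), String.ofList [c])

-- ===== PORT B =====
-- B's recursive helper `go` over the half-open interval [lo, hi); returns the final lower bound.
def pvGoB (cs : List Char) (c : Char) (lo hi : Int) : Int :=
  if _h : lo ≥ hi then
    lo
  else
    let mid := PySem.Int.floordiv (lo + hi - 1) 2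
    if (PySem.List.pyGet? cs mid).getD ' ' == c then
      pvGoB cs c (mid + 1) hi
    else
      pvGoB cs c lo mid
termination_by (hi - lo).toNat
decreasing_by
  · have := PySem.Int.floordiv_two_mid_bounds (lo := lo) (hi := hi - 1) (by omega)
    have e : lo + (hi - 1) = lo + hi - 1 := by ring
    rw [e] at this; omega
  · have := PySem.Int.floordiv_two_mid_bounds (lo := lo) (hi := hi - 1) (by omega)
    have e : lo + (hi - 1) = lo + hi - 1 := by ring
    rw [e] at this; omega

def SearchPartitionStart_alt (s : String) : Int × String :=
  match PySem.List.pyGet? s.toList 0 with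
  | none => (0, "")   -- unreachable under Pre_: Python raises IndexError at s[0] on empty s
  | some c => (pvGoB s.toList c 0 (s.toList.length : Int), String.ofList [c])

-- ===== PRECONDITION & SPEC =====
-- Pre_ excludes exactly the empty string, on which Python A raises IndexError at s[left].
def Pre_SearchPartitionStart (s : String) : Prop := s.toList ≠ []
instance (s : String) : Decidable (Pre_SearchPartitionStart s) := by unfold Pre_SearchPartitionStart; infer_instance
def pvWitness_SearchPartitionStart : String := "aab"

def Spec_SearchPartitionStart (s : String) (out : Int × String) : Prop := out = SearchPartitionStart_alt s
instance (s : String) (out : Int × String) : Decidable (Spec_SearchPartitionStart s out) := by unfold Spec_SearchPartitionStart; infer_instance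

-- ===== CLAIM (what is proved, stated in full; the proofs are below) =====
def Claim_equal_SearchPartitionStart : Prop := ∀ (s : String), Dom_SearchPartitionStart s → Pre_SearchPartitionStart s → Spec_SearchPartitionStart s (SearchPartitionStart s)

-- ===== LEMMAS AND PROOFS =====

-- Invariant pidx = left - 1: A's loop equals B's helper on the corresponding half-open interval.
theorem pvLoopA_eq_pvGoB (cs : List Char) (c : Char) :
    ∀ l r : Int, pvLoopA cs c l r (l - 1) = pvGoB cs c l (r + 1) := by
  intro l r
  by_cases h : l ≤ r
  · have hm := PySem.Int.floordiv_two_mid_bounds h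
    rw [pvLoopA, pvGoB]
    simp only [dif_pos h, dif_neg (by omega : ¬ l ≥ r + 1)]
    have hmid : PySem.Int.floordiv (l + (r + 1) - 1) 2 = PySem.Int.floordiv (l + r) 2 := by
      ring_nf
    rw [hmid]
    split
    · have := pvLoopA_eq_pvGoB cs c (PySem.Int.floordiv (l + r) 2 + 1) r
      simpa using this
    · have := pvLoopA_eq_pvGoB cs c l (PySem.Int.floordiv (l + r) 2 - 1)
      simpa using this
  · rw [pvLoopA, pvGoB]
    simp only [dif_neg h, dif_pos (by omega : l ≥ r + 1)]
    omega
termination_by l r => (r + 1 - l).toNat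
decreasing_by
  · omega
  · omega

-- ===== VERDICT (by name: the statement is the Claim_ definition above) =====
theorem SearchPartitionStart_spec : Claim_equal_SearchPartitionStart := by
  intro s _ _
  unfold Spec_SearchPartitionStart SearchPartitionStart SearchPartitionStart_alt
  cases hget : PySem.List.pyGet? s.toList 0 with
  | none => rfl
  | some c =>
    simp only
    have := pvLoopA_eq_pvGoB s.toList c 0 ((s.toList.length : Int) - 1)
    simp only [zero_sub] at this
    rw [this]
    ring_nf
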